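-- pv_equiv track=rewrite | github.com/Hmbown/Bachbot | bachbot/encodings/musicxml_io.py | _canonical_voice_id
-- ===== SOURCE A (Python) =====
-- VOICE_ABBREVIATIONS = {
--     "soprano": "S",
--     "alto": "A",
--     "tenor": "T",
--     "bass": "B",
-- }
--
-- def _canonical_voice_id(part_name: str, voice_number: str, existing: set[str]) -> str:
--     normalized = part_name.strip().lower()
--     base = VOICE_ABBREVIATIONS.get(normalized, part_name.strip() or f"V{voice_number}")
--     if base not in existing:
--         return base
--     candidate = f"{base}:{voice_number}"
--     if candidate not in existing:
--         return candidate
--     suffix = 2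
--     while f"{candidate}:{suffix}" in existing:
--         suffix += 1
--     return f"{candidate}:{suffix}"
-- ===== SOURCE B (Python) =====
-- VOICE_ABBREVIATIONS = {
--     "soprano": "S",
--     "alto": "A",
--     "tenor": "T",
--     "bass": "B",
-- }
--
-- def _canonical_voice_id(part_name: str, voice_number: str, existing: set[str]) -> str:
--     normalized = part_name.strip().lower()
--     base = VOICE_ABBREVIATIONS.get(normalized, part_name.strip() or f"V{voice_number}")
--     stem = f"{base}:{voice_number}"
--     prefix = f"{stem}:"
--     base_taken = False
--     stem_taken = False
--     suffixes = set()
--     for name in existing: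
--         if name == base:
--             base_taken = True
--         elif name == stem:
--             stem_taken = True
--         elif name.startswith(prefix):
--             suffixes.add(name[len(prefix):])
--     if not base_taken:
--         return base
--     if not stem_taken:
--         return stem
--     n = 2
--     while str(n) in suffixes:
--         n += 1
--     return f"{stem}:{n}"
-- ===== Notes on version B (the rewrite author's own statement) =====
-- stated objective: alternative
-- what changed: Instead of generating candidates and testing each for membership, B makes one pass over existing, classifying every name against base/stem/'stem:' into two flags and a set of numeric-suffix strings, then computes the smallest free suffix from that set.
import Mathlib
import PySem

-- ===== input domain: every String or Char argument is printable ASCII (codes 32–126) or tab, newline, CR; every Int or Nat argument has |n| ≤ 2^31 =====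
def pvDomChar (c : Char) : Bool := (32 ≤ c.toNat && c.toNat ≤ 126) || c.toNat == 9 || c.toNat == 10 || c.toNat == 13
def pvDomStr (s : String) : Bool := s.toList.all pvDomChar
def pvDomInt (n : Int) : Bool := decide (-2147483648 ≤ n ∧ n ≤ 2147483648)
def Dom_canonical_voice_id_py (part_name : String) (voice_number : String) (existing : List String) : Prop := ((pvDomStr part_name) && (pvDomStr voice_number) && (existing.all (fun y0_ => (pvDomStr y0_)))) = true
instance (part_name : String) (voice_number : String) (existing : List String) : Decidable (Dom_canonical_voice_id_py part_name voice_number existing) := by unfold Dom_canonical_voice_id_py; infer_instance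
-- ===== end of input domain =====

-- B makes ONE pass over `existing`, classifying each name against base/stem/"stem:" into
-- two flags and a set of numeric-suffix strings, then takes the least free suffix from the
-- set — instead of A's candidate-by-candidate membership testing (objective: alternative).

-- ===== PORT A =====
def pvVoiceAbbrev : PySem.Dict String String :=
  PySem.Dict.ofList [("soprano", "S"), ("alto", "A"), ("tenor", "T"), ("bass", "B")]

-- A's 'while f"{candidate}:{suffix}" in existing' loop; fuel existing.length+1 always
-- suffices (the checked strings are pairwise distinct), so the fuel-0 escape is unreached
def pvLoopA (candidate : String) (existing : List String) : Nat → Int → String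
  | 0, suffix => candidate ++ ":" ++ PySem.Int.toStr suffix
  | n + 1, suffix =>
      if existing.contains (candidate ++ ":" ++ PySem.Int.toStr suffix) then
        pvLoopA candidate existing n (suffix + 1)
      else candidate ++ ":" ++ PySem.Int.toStr suffix

def canonical_voice_id_py (part_name : String) (voice_number : String) (existing : List String) : String :=
  let normalized := PySem.Str.lower (PySem.Str.strip part_name)
  let base := (pvVoiceAbbrev.get? normalized).getD
    (if PySem.Str.strip part_name = "" then "V" ++ voice_number else PySem.Str.strip part_name)
  if existing.contains base then
    let candidate := base ++ ":" ++ voice_number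
    if existing.contains candidate then
      pvLoopA candidate existing (existing.length + 1) 2
    else candidate
  else base

-- ===== PORT B =====
-- one classification step of B's single pass over `existing`
def pvStepB (base stem pre : String) (st : Bool × Bool × PySem.Set String) (name : String) :
    Bool × Bool × PySem.Set String :=
  if name = base then (true, st.2.1, st.2.2)
  else if name = stem then (st.1, true, st.2.2)
  else if PySem.Str.startswith name pre then
    (st.1, st.2.1, st.2.2.add (PySem.Str.slice name (some (PySem.Str.len pre : Int)) none))
  else st

-- B's 'while str(n) in suffixes' loop; fuel existing.length+1 always suffices (the set
-- holds at most existing.length suffixes and the tested strings are pairwise distinct)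
def pvMexB (suffixes : PySem.Set String) : Nat → Int → Int
  | 0, n => n
  | k + 1, n =>
      if suffixes.contains (PySem.Int.toStr n) then pvMexB suffixes k (n + 1) else n

def canonical_voice_id_py_alt (part_name : String) (voice_number : String) (existing : List String) : String :=
  let normalized := PySem.Str.lower (PySem.Str.strip part_name)
  let base := (pvVoiceAbbrev.get? normalized).getD
    (if PySem.Str.strip part_name = "" then "V" ++ voice_number else PySem.Str.strip part_name)
  let stem := base ++ ":" ++ voice_number
  let pre := stem ++ ":"
  let r := existing.foldl (pvStepB base stem pre) (false, false, PySem.Set.empty)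
  if !r.1 then base
  else if !r.2.1 then stem
  else stem ++ ":" ++ PySem.Int.toStr (pvMexB r.2.2 (existing.length + 1) 2)

-- ===== PRECONDITION & SPEC =====
def Spec_canonical_voice_id_py (part_name : String) (voice_number : String) (existing : List String) (out : String) : Prop := out = canonical_voice_id_py_alt part_name voice_number existing
instance (part_name : String) (voice_number : String) (existing : List String) (out : String) : Decidable (Spec_canonical_voice_id_py part_name voice_number existing out) := by unfold Spec_canonical_voice_id_py; infer_instance

-- ===== CLAIM (what is proved, stated in full; the proofs are below) =====
def Claim_equal_canonical_voice_id_py : Prop := ∀ (part_name : String) (voice_number : String) (existing : List String), Dom_canonical_voice_id_py part_name voice_number existing → Spec_canonical_voice_id_py part_name voice_number existing (canonical_voice_id_py part_name voice_number existing)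

-- ===== LEMMAS AND PROOFS =====

theorem pv_contains_add (s : PySem.Set String) (x y : String) :
    ((PySem.Set.add s x).contains y = true) ↔ (s.contains y = true ∨ x = y) := by
  simp only [PySem.Set.add]
  split
  · rename_i hx
    simp only [PySem.Set.contains, List.contains_iff_mem] at hx ⊢
    constructor
    · exact Or.inl
    · rintro (h | h)
      · exact h
      · exact h ▸ hx
  · simp only [PySem.Set.contains, List.contains_iff_mem, List.mem_append,
      List.mem_singleton]
    exact or_congr Iff.rfl eq_comm

-- the single pass computes: base taken?, stem taken?, and the set of suffixes s with pre++s in existing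
theorem pvFold_spec (base stem pre : String)
    (hb : ¬ pre.toList <+: base.toList) (hs : ¬ pre.toList <+: stem.toList)
    (hbs : base ≠ stem) :
    ∀ (existing : List String) (st : Bool × Bool × PySem.Set String),
      ((existing.foldl (pvStepB base stem pre) st).1 = true ↔
        st.1 = true ∨ base ∈ existing) ∧
      ((existing.foldl (pvStepB base stem pre) st).2.1 = true ↔
        st.2.1 = true ∨ stem ∈ existing) ∧
      ∀ s : String, ((existing.foldl (pvStepB base stem pre) st).2.2.contains s = true ↔
        st.2.2.contains s = true ∨ (pre ++ s) ∈ existing) := by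
  have hnb : ∀ s : String, pre ++ s ≠ base := by
    intro s hEq
    exact hb ⟨s.toList, by rw [← String.toList_append, hEq]⟩
  have hns : ∀ s : String, pre ++ s ≠ stem := by
    intro s hEq
    exact hs ⟨s.toList, by rw [← String.toList_append, hEq]⟩
  intro existing
  induction existing with
  | nil => intro st; exact ⟨by simp, by simp, fun s => by simp⟩
  | cons name rest ih =>
    intro st
    simp only [List.foldl_cons]
    obtain ⟨ih1, ih2, ih3⟩ := ih (pvStepB base stem pre st name)
    by_cases h1 : name = base
    · refine ⟨?_, ?_, ?_⟩
      · rw [ih1]; simp [pvStepB, h1]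
      · rw [ih2]; simp [pvStepB, h1, Ne.symm hbs]
      · intro s; rw [ih3 s]; simp [pvStepB, h1, hnb s]
    · by_cases h2 : name = stem
      · refine ⟨?_, ?_, ?_⟩
        · rw [ih1]; simp [pvStepB, h2, hbs, Ne.symm hbs]
        · rw [ih2]; simp [pvStepB, h2, Ne.symm hbs]
        · intro s; rw [ih3 s]; simp [pvStepB, h2, Ne.symm hbs, hns s]
      · have hba : base ≠ name := fun e => h1 e.symm
        have hsa : stem ≠ name := fun e => h2 e.symm
        by_cases h3 : PySem.Str.startswith name pre = true
        · have hpref : pre.toList <+: name.toList := by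
            rw [PySem.Str.startswith_eq, PySem.Chars.startswith_iff] at h3; exact h3
          obtain ⟨t, ht⟩ := hpref
          have hrest : (PySem.Str.slice name (some (PySem.Str.len pre)) none).toList = t := by
            rw [PySem.Str.toList_slice, PySem.Chars.slice_eq_listSlice, PySem.Str.len_eq,
              PySem.List.slice_from_natCast, ← ht, List.drop_left]
          have hkey : ∀ s : String,
              (PySem.Str.slice name (some (PySem.Str.len pre)) none = s) ↔ pre ++ s = name := by
            intro s
            rw [← String.toList_inj, hrest, ← String.toList_inj (s₁ := pre ++ s),
              String.toList_append, ← ht]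
            constructor
            · intro h; rw [h]
            · intro h; exact (List.append_cancel_left h).symm
          refine ⟨?_, ?_, ?_⟩
          · rw [ih1]; simp only [pvStepB, if_neg h1, if_neg h2, if_pos h3]
            simp [List.mem_cons, hba]
          · rw [ih2]; simp only [pvStepB, if_neg h1, if_neg h2, if_pos h3]
            simp [List.mem_cons, hsa]
          · intro s
            rw [ih3 s, List.mem_cons]
            simp only [pvStepB, if_neg h1, if_neg h2, if_pos h3]
            rw [pv_contains_add, hkey s]
            constructor
            · rintro ((h | h) | h)
              · exact Or.inl h
              · exact Or.inr (Or.inl h)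
              · exact Or.inr (Or.inr h)
            · rintro (h | h | h)
              · exact Or.inl (Or.inl h)
              · exact Or.inl (Or.inr h)
              · exact Or.inr h
        · have hnn : ∀ s : String, pre ++ s ≠ name := by
            intro s hEq
            exact h3 (by
              rw [PySem.Str.startswith_eq, PySem.Chars.startswith_iff]
              exact ⟨s.toList, by rw [← String.toList_append, hEq]⟩)
          have h3' : PySem.Chars.startswith name.toList pre.toList = false := by
            rw [← PySem.Str.startswith_eq]
            exact Bool.eq_false_iff.mpr h3
          refine ⟨?_, ?_, ?_⟩
          · rw [ih1]; simp [pvStepB, h1, h2, h3', List.mem_cons, hba]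
          · rw [ih2]; simp [pvStepB, h1, h2, h3', List.mem_cons, hsa]
          · intro s; rw [ih3 s]; simp [pvStepB, h1, h2, h3', List.mem_cons, hnn s]

-- with the suffix set characterised, A's while-loop and B's mex loop march in lockstep
theorem pvLoopA_eq_mex (stem : String) (existing : List String) (suf : PySem.Set String)
    (h : ∀ s, suf.contains s = true ↔ (stem ++ ":" ++ s) ∈ existing) :
    ∀ (n : Nat) (i : Int),
      pvLoopA stem existing n i = stem ++ ":" ++ PySem.Int.toStr (pvMexB suf n i) := by
  intro n
  induction n with
  | zero => intro i; rfl
  | succ n ihn =>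
    intro i
    have hc : existing.contains (stem ++ ":" ++ PySem.Int.toStr i)
        = suf.contains (PySem.Int.toStr i) := by
      rw [Bool.eq_iff_iff, List.contains_iff_mem]
      exact (h _).symm
    simp only [pvLoopA, pvMexB, hc]
    split
    · exact ihn (i + 1)
    · rfl

-- ===== VERDICT (by name: the statement is the Claim_ definition above) =====
theorem canonical_voice_id_py_spec : Claim_equal_canonical_voice_id_py := by
  unfold Claim_equal_canonical_voice_id_py
  intro part_name voice_number existing _
  unfold Spec_canonical_voice_id_py canonical_voice_id_py canonical_voice_id_py_alt
  set base := (pvVoiceAbbrev.get? (PySem.Str.lower (PySem.Str.strip part_name))).getD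
    (if PySem.Str.strip part_name = "" then "V" ++ voice_number else PySem.Str.strip part_name)
    with hbase
  set stem := base ++ ":" ++ voice_number with hstem
  set pre := stem ++ ":" with hpre
  have hb : ¬ pre.toList <+: base.toList := by
    intro hp
    have := hp.length_le
    simp only [hpre, hstem, String.toList_append, List.length_append] at this
    simp at this
    omega
  have hs : ¬ pre.toList <+: stem.toList := by
    intro hp
    have := hp.length_le
    simp only [hpre, String.toList_append, List.length_append] at this
    simp at this
  have hbs : base ≠ stem := by
    intro hEq
    have := congrArg (fun z => z.toList.length) hEq
    simp only [hstem, String.toList_append, List.length_append] at this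
    simp at this
    omega
  obtain ⟨h1, h2, h3⟩ := pvFold_spec base stem pre hb hs hbs existing
    (false, false, PySem.Set.empty)
  set r := existing.foldl (pvStepB base stem pre) (false, false, PySem.Set.empty) with hr
  have hr1 : r.1 = existing.contains base := by
    rw [Bool.eq_iff_iff, List.contains_iff_mem]
    simpa using h1
  have hr2 : r.2.1 = existing.contains stem := by
    rw [Bool.eq_iff_iff, List.contains_iff_mem]
    simpa using h2
  show (if existing.contains base then
          if existing.contains (base ++ ":" ++ voice_number) then
            pvLoopA (base ++ ":" ++ voice_number) existing (existing.length + 1) 2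
          else base ++ ":" ++ voice_number
        else base)
      = (if !r.1 then base
         else if !r.2.1 then stem
         else stem ++ ":" ++ PySem.Int.toStr (pvMexB r.2.2 (existing.length + 1) 2))
  rw [hr1, hr2, ← hstem]
  by_cases hcb : existing.contains base = true
  · rw [if_pos hcb, hcb]
    by_cases hcs : existing.contains stem = true
    · rw [if_pos hcs, hcs]
      simp only [Bool.not_true, Bool.false_eq_true, if_false]
      refine pvLoopA_eq_mex stem existing r.2.2 ?_ (existing.length + 1) 2
      intro s
      rw [h3 s]
      simp [hpre]
    · rw [if_neg hcs]
      rw [Bool.not_eq_true] at hcs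
      rw [hcs]
      simp
  · rw [if_neg hcb]
    rw [Bool.not_eq_true] at hcb
    rw [hcb]
    simp
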